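-- pv_equiv track=rewrite | github.com/biofe/coevo_pipeline | coevo/sequences/motif_detection.py | _parse_fragment
-- ===== SOURCE A (Python) =====
-- def _parse_fragment(fragment: str, alphabet: frozenset[str]) -> list[frozenset[str]]:
--     """Parse a fragment pattern into a list of per-position character sets.
--
--     Each *token* in the pattern string produces one entry in the returned
--     list, representing the set of characters accepted at that residue
--     position:
--
--     - A plain character (e.g. ``'a'``) → ``frozenset({'a'})``
--     - ``[ag]`` – character class → ``frozenset({'a', 'g'})``
--     - ``{a}`` – negated character class → *alphabet* ``-`` ``frozenset({'a'})``
--     - ``x`` – wildcard → *alphabet* (any residue)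
--
--     Matching is always case-insensitive; all characters are lowered
--     internally.
--
--     Parameters
--     ----------
--     fragment:
--         Fragment pattern string (e.g. ``"a[cg]{p}x"``).
--     alphabet:
--         Set of valid lower-case characters for the molecule type.
--
--     Returns
--     -------
--     list[frozenset[str]]
--         One frozenset per character position described by the fragment.
--
--     Raises
--     ------
--     ValueError
--         If a ``[`` or ``{`` bracket is not properly closed.
--     """
--     token_sets: list[frozenset[str]] = []
--     i = 0
--     while i < len(fragment):
--         ch = fragment[i]
--         if ch == "[":
--             try:
--                 j = fragment.index("]", i + 1)
--             except ValueError: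
--                 raise ValueError(f"Unclosed '[' in fragment {fragment!r} at position {i}")
--             chars = frozenset(c.lower() for c in fragment[i + 1 : j])
--             token_sets.append(chars)
--             i = j + 1
--         elif ch == "{":
--             try:
--                 j = fragment.index("}", i + 1)
--             except ValueError:
--                 raise ValueError(f"Unclosed '{{' in fragment {fragment!r} at position {i}")
--             excluded = frozenset(c.lower() for c in fragment[i + 1 : j])
--             token_sets.append(alphabet - excluded)
--             i = j + 1
--         elif ch.lower() == "x":
--             token_sets.append(alphabet)
--             i += 1
--         else:
--             token_sets.append(frozenset([ch.lower()]))
--             i += 1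
--     return token_sets
-- ===== SOURCE B (Python) =====
-- def _parse_fragment(fragment: str, alphabet: frozenset[str]) -> list[frozenset[str]]:
--     """Single-pass state-machine parser: one scan with an explicit mode
--     (normal / inside-[] / inside-{}), a character buffer, and the recorded
--     opening-bracket position."""
--     token_sets: list[frozenset[str]] = []
--     closer = None          # expected closing bracket, or None in normal mode
--     buf: list[str] = []
--     open_at = 0
--     for pos, ch in enumerate(fragment):
--         if closer is None:
--             if ch == "[" or ch == "{":
--                 closer = "]" if ch == "[" else "}"
--                 buf = []
--                 open_at = pos
--             elif ch.lower() == "x":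
--                 token_sets.append(alphabet)
--             else:
--                 token_sets.append(frozenset([ch.lower()]))
--         elif ch == closer:
--             chars = frozenset(c.lower() for c in buf)
--             token_sets.append(chars if closer == "]" else alphabet - chars)
--             closer = None
--         else:
--             buf.append(ch)
--     if closer is not None:
--         opener = "[" if closer == "]" else "{"
--         raise ValueError(f"Unclosed '{opener}' in fragment {fragment!r} at position {open_at}")
--     return token_sets
-- ===== Notes on version B (the rewrite author's own statement) =====
-- stated objective: alternative
-- what changed: Replaced the index-and-jump loop (str.index to find the closing bracket, slice, skip ahead) by a single left-to-right state-machine scan with an explicit mode (normal / in-class / in-negated-class) and a character buffer.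
import Mathlib
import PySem

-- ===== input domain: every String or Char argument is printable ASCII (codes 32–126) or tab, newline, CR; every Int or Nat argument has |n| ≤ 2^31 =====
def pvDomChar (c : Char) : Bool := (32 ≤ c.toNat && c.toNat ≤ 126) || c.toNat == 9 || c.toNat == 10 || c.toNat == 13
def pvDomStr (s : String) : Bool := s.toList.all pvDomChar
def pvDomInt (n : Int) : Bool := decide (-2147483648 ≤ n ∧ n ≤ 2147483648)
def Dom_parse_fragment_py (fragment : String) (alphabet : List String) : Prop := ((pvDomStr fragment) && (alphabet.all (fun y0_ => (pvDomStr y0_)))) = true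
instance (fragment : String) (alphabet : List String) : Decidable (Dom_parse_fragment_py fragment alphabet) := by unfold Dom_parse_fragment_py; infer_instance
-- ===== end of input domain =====

-- B replaces A's find-the-closer-and-jump loop by a one-pass state-machine scan (same behaviour, same cost); on return values only — neither mutates its arguments.

-- a lowered single-character string, as Python's ch.lower() produces for the set elements
def pvLowStr (c : Char) : String := String.ofList [PySem.Chars.lowerChar c]

-- ===== PORT A =====
-- while-loop with i: transcribed as recursion on the remaining characters; fragment.index("]", i+1)
-- becomes PySem.List.index? on the tail, the slice fragment[i+1:j] becomes take j, i = j+1 becomes drop (j+1).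
-- Where Python raises ValueError (unclosed bracket, index? = none) the port returns [] — excluded by Pre_.
def pvGoA (alphabet : List String) : List Char → List (List String)
  | [] => []
  | c :: rest =>
    if c = '[' then
      match PySem.List.index? rest ']' with
      | none => []
      | some j =>
        PySem.Set.ofList ((rest.take j).map pvLowStr) :: pvGoA alphabet (rest.drop (j + 1))
    else if c = '{' then
      match PySem.List.index? rest '}' with
      | none => []
      | some j =>
        PySem.Set.diff alphabet (PySem.Set.ofList ((rest.take j).map pvLowStr)) :: pvGoA alphabet (rest.drop (j + 1))
    else if PySem.Chars.lowerChar c = 'x' then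
      alphabet :: pvGoA alphabet rest
    else
      PySem.Set.ofList [pvLowStr c] :: pvGoA alphabet rest
  termination_by cs => cs.length
  decreasing_by all_goals (simp [List.length_drop]; try omega)

def parse_fragment_py (fragment : String) (alphabet : List String) : List (List String) :=
  pvGoA alphabet fragment.toList

-- ===== PORT B =====
-- the flushed token: class chars (lowered at flush time), or alphabet minus them for a negated class
def pvTok (alphabet : List String) (closer : Char) (buf : List Char) : List String :=
  if closer = ']' then PySem.Set.ofList (buf.map pvLowStr)
  else PySem.Set.diff alphabet (PySem.Set.ofList (buf.map pvLowStr))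

-- single scan; state = expected closer (none ⇒ normal mode) and the character buffer.
-- Where Python B raises ValueError (scan ends inside a class) the port yields no further tokens — excluded by Pre_.
def pvGoB (alphabet : List String) : List Char → Option Char → List Char → List (List String)
  | [], _, _ => []
  | c :: rest, none, _ =>
    if c = '[' then pvGoB alphabet rest (some ']') []
    else if c = '{' then pvGoB alphabet rest (some '}') []
    else if PySem.Chars.lowerChar c = 'x' then alphabet :: pvGoB alphabet rest none []
    else PySem.Set.ofList [pvLowStr c] :: pvGoB alphabet rest none []
  | c :: rest, some d, buf =>
    if c = d then pvTok alphabet d buf :: pvGoB alphabet rest none []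
    else pvGoB alphabet rest (some d) (buf ++ [c])

def parse_fragment_py_alt (fragment : String) (alphabet : List String) : List (List String) :=
  pvGoB alphabet fragment.toList none []

-- ===== PRECONDITION & SPEC =====
-- Pre_ excludes exactly the fragments on which A raises ValueError (an unclosed '[' or '{');
-- B raises the identical ValueError there. It is a grammar (shape) condition on the string —
-- membership in the regular language (plain | '[' nonCloser* ']' | '{' nonCloser* '}')* ,
-- i.e. every opening bracket outside a class has a matching later closer; pvBalanced below is
-- its membership test (it tracks only the expected closer, no tokens, buffers or outputs).
def pvBalanced : List Char → Option Char → Bool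
  | [], closer => closer.isNone
  | c :: rest, none =>
    if c = '[' then pvBalanced rest (some ']')
    else if c = '{' then pvBalanced rest (some '}')
    else pvBalanced rest none
  | c :: rest, some d =>
    if c = d then pvBalanced rest none else pvBalanced rest (some d)

def Pre_parse_fragment_py (fragment : String) (alphabet : List String) : Prop :=
  pvBalanced fragment.toList none = true

instance (fragment : String) (alphabet : List String) : Decidable (Pre_parse_fragment_py fragment alphabet) := by
  unfold Pre_parse_fragment_py; infer_instance

def pvWitness_parse_fragment_py : String × List String := ("a[cg]{p}x", ["a", "c", "g", "t"])

def Spec_parse_fragment_py (fragment : String) (alphabet : List String) (out : List (List String)) : Prop := out = parse_fragment_py_alt fragment alphabet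
instance (fragment : String) (alphabet : List String) (out : List (List String)) : Decidable (Spec_parse_fragment_py fragment alphabet out) := by unfold Spec_parse_fragment_py; infer_instance

-- ===== CLAIM (what is proved, stated in full; the proofs are below) =====
def Claim_equal_parse_fragment_py : Prop := ∀ (fragment : String) (alphabet : List String), Dom_parse_fragment_py fragment alphabet → Pre_parse_fragment_py fragment alphabet → Spec_parse_fragment_py fragment alphabet (parse_fragment_py fragment alphabet)

-- ===== LEMMAS AND PROOFS =====

-- in class mode, B's buffered scan computes exactly A's index?-take-drop step
theorem pvGoB_closer (alphabet : List String) (d : Char) :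
    ∀ (rest buf : List Char),
      pvGoB alphabet rest (some d) buf =
        match PySem.List.index? rest d with
        | none => []
        | some j => pvTok alphabet d (buf ++ rest.take j) :: pvGoB alphabet (rest.drop (j + 1)) none [] := by
  intro rest
  induction rest with
  | nil => intro buf; simp [pvGoB, PySem.List.index?]
  | cons c rest ih =>
    intro buf
    by_cases hc : c = d
    · subst hc
      rw [PySem.List.index?_cons_self c rest]
      simp [pvGoB]
    · rw [PySem.List.index?_cons_of_ne rest hc]
      simp only [pvGoB, if_neg hc, ih (buf ++ [c])]
      cases PySem.List.index? rest d with
      | none => rfl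
      | some j => simp [List.take_succ_cons, List.drop_succ_cons, List.append_assoc]

-- a balanced class scan finds its closer: index? succeeds and the remainder is balanced
theorem pvBalanced_closer (d : Char) :
    ∀ rest : List Char, pvBalanced rest (some d) = true →
      ∃ j, PySem.List.index? rest d = some j ∧ pvBalanced (rest.drop (j + 1)) none = true := by
  intro rest
  induction rest with
  | nil => intro h; simp [pvBalanced] at h
  | cons c rest ih =>
    intro h
    by_cases hc : c = d
    · subst hc
      refine ⟨0, PySem.List.index?_cons_self c rest, ?_⟩
      simpa [pvBalanced] using h
    · simp only [pvBalanced, if_neg hc] at h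
      obtain ⟨j, hj, hb⟩ := ih h
      refine ⟨j + 1, ?_, ?_⟩
      · rw [PySem.List.index?_cons_of_ne rest hc]
        simpa using hj
      · simpa using hb

theorem pvGoA_eq_pvGoB (alphabet : List String) :
    ∀ (n : Nat) (cs : List Char), cs.length ≤ n → pvBalanced cs none = true →
      pvGoA alphabet cs = pvGoB alphabet cs none [] := by
  intro n
  induction n with
  | zero =>
    intro cs hn _
    have : cs = [] := List.length_eq_zero_iff.mp (Nat.le_zero.mp hn)
    subst this; simp [pvGoA, pvGoB]
  | succ n ih =>
    intro cs hn hb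
    cases cs with
    | nil => simp [pvGoA, pvGoB]
    | cons c rest =>
      by_cases h1 : c = '['
      · subst h1
        simp [pvBalanced] at hb
        obtain ⟨j, hj, hrest⟩ := pvBalanced_closer ']' rest hb
        have hdrop : (rest.drop (j + 1)).length ≤ n := by
          have := List.length_drop (l := rest) (i := j + 1)
          simp at hn; omega
        have hB : pvGoB alphabet ('[' :: rest) none [] = pvGoB alphabet rest (some ']') [] := by
          simp [pvGoB]
        have hj' : List.idxOf? ']' rest = some j := by simpa using hj
        rw [pvGoA, hB, pvGoB_closer]
        simp [hj', pvTok, ih _ hdrop hrest]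
      · by_cases h2 : c = '{'
        · subst h2
          simp [pvBalanced] at hb
          obtain ⟨j, hj, hrest⟩ := pvBalanced_closer '}' rest hb
          have hdrop : (rest.drop (j + 1)).length ≤ n := by
            have := List.length_drop (l := rest) (i := j + 1)
            simp at hn; omega
          have hB : pvGoB alphabet ('{' :: rest) none [] = pvGoB alphabet rest (some '}') [] := by
            simp [pvGoB]
          have hj' : List.idxOf? '}' rest = some j := by simpa using hj
          rw [pvGoA, hB, pvGoB_closer]
          simp [hj', pvTok, ih _ hdrop hrest]
        · have hb' : pvBalanced rest none = true := by
            simpa [pvBalanced, if_neg h1, if_neg h2] using hb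
          have hrest : rest.length ≤ n := by simp at hn; omega
          rw [pvGoA, pvGoB]
          simp [if_neg h1, if_neg h2, ih rest hrest hb']

-- ===== VERDICT (by name: the statement is the Claim_ definition above) =====
theorem parse_fragment_py_spec : Claim_equal_parse_fragment_py := by
  intro fragment alphabet _ hpre
  unfold Spec_parse_fragment_py parse_fragment_py parse_fragment_py_alt
  exact pvGoA_eq_pvGoB alphabet fragment.toList.length fragment.toList le_rfl hpre
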